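-- pv_equiv track=rewrite | github.com/981377660LMT/algorithm-study | 21_位运算/经典题/三种状态异或转化.py | solve
-- ===== SOURCE A (Python) =====
-- def solve(quxes):
--     n = len(quxes)
--     if len(set(quxes)) == 1:
--         return n
--     if n <= 1:
--         return n
--
--     xor_ = 0
--     mapping = {"R": 1, "G": 2, "B": 3}
--     for qux in quxes:
--         xor_ ^= mapping[qux]
--     return 2 if xor_ == 0 else 1
-- ===== SOURCE B (Python) =====
-- def solve(quxes):
--     n = len(quxes)
--     if len(set(quxes)) == 1:
--         return n
--     if n <= 1:
--         return n
--     r = quxes.count("R") % 2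
--     g = quxes.count("G") % 2
--     b = quxes.count("B") % 2
--     return 2 if r == g == b else 1
-- ===== Notes on version B (the rewrite author's own statement) =====
-- stated objective: simpler
-- what changed: Replaces the XOR-accumulating loop over a 1/2/3 dict encoding by three list.count calls and a three-way parity comparison (all parities equal -> 2, else 1).
import Mathlib
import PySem

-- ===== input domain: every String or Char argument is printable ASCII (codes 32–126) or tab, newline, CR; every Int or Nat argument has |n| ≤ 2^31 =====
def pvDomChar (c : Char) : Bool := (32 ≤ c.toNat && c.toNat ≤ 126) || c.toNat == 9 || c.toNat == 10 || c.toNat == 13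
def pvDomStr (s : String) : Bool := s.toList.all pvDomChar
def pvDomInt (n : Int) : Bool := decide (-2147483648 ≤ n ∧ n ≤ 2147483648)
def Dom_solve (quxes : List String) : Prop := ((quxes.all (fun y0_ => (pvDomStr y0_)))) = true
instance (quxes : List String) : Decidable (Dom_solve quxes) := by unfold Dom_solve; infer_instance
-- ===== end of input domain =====

-- B drops the XOR loop and the 1/2/3 dict: three list.count calls and a three-way parity
-- comparison give the same answer (objective: simpler).

-- ===== PORT A =====
def solve (quxes : List String) : Int :=
  let n : Int := quxes.length
  if PySem.Set.len (PySem.Set.ofList quxes) = 1 then n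
  else if n ≤ 1 then n
  else
    let mapping : PySem.Dict String Nat := PySem.Dict.ofList [("R", 1), ("G", 2), ("B", 3)]
    let xor? : Option Nat := quxes.foldl (fun acc qux =>
      match acc, PySem.Dict.get? mapping qux with
      | some x, some v => some (x ^^^ v)
      | _, _ => none) (some 0)
    match xor? with
    | some 0 => 2
    | some _ => 1
    | none => 0   -- Python raises KeyError here; excluded by Pre_solve

-- ===== PORT B =====
def solve_alt (quxes : List String) : Int :=
  let n : Int := quxes.length
  if PySem.Set.len (PySem.Set.ofList quxes) = 1 then n
  else if n ≤ 1 then n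
  else
    let r := PySem.List.count quxes "R" % 2
    let g := PySem.List.count quxes "G" % 2
    let b := PySem.List.count quxes "B" % 2
    if r = g ∧ g = b then 2 else 1

-- ===== PRECONDITION & SPEC =====
-- Pre_ excludes exactly the inputs on which A raises KeyError: length ≥ 2, not all
-- elements equal, and some element outside {"R","G","B"}.
def Pre_solve (quxes : List String) : Prop :=
  quxes.length ≤ 1 ∨ (∀ q ∈ quxes, ∀ q' ∈ quxes, q = q') ∨
    (∀ q ∈ quxes, q = "R" ∨ q = "G" ∨ q = "B")
instance (quxes : List String) : Decidable (Pre_solve quxes) := by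
  unfold Pre_solve; infer_instance

def pvWitness_solve : List String := ["R", "G", "B", "B"]

def Spec_solve (quxes : List String) (out : Int) : Prop := out = solve_alt quxes
instance (quxes : List String) (out : Int) : Decidable (Spec_solve quxes out) := by unfold Spec_solve; infer_instance

-- ===== CLAIM (what is proved, stated in full; the proofs are below) =====
def Claim_equal_solve : Prop := ∀ (quxes : List String), Dom_solve quxes → Pre_solve quxes → Spec_solve quxes (solve quxes)

-- ===== LEMMAS AND PROOFS =====

-- parity encoding of the running XOR: enc pR pG pB = pR*1 ^^^ pG*2 ^^^ pB*3
def encXor (pR pG pB : Nat) : Nat := (pR * 1) ^^^ ((pG * 2) ^^^ (pB * 3))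

lemma encXor_R (c g b : Nat) :
    1 ^^^ encXor (c % 2) (g % 2) (b % 2) = encXor ((c + 1) % 2) (g % 2) (b % 2) := by
  have hc : (c + 1) % 2 = 1 - c % 2 := by omega
  rcases Nat.mod_two_eq_zero_or_one c with h | h <;>
    rcases Nat.mod_two_eq_zero_or_one g with hg | hg <;>
      rcases Nat.mod_two_eq_zero_or_one b with hb | hb <;>
        simp [h, hg, hb, hc, encXor]

lemma encXor_G (c g b : Nat) :
    2 ^^^ encXor (c % 2) (g % 2) (b % 2) = encXor (c % 2) ((g + 1) % 2) (b % 2) := by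
  have hg' : (g + 1) % 2 = 1 - g % 2 := by omega
  rcases Nat.mod_two_eq_zero_or_one c with h | h <;>
    rcases Nat.mod_two_eq_zero_or_one g with hg | hg <;>
      rcases Nat.mod_two_eq_zero_or_one b with hb | hb <;>
        simp [h, hg, hb, hg', encXor]

lemma encXor_B (c g b : Nat) :
    3 ^^^ encXor (c % 2) (g % 2) (b % 2) = encXor (c % 2) (g % 2) ((b + 1) % 2) := by
  have hb' : (b + 1) % 2 = 1 - b % 2 := by omega
  rcases Nat.mod_two_eq_zero_or_one c with h | h <;>
    rcases Nat.mod_two_eq_zero_or_one g with hg | hg <;>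
      rcases Nat.mod_two_eq_zero_or_one b with hb | hb <;>
        simp [h, hg, hb, hb', encXor]

lemma encXor_eq_zero_iff (c g b : Nat) :
    (encXor (c % 2) (g % 2) (b % 2) = 0) ↔ (c % 2 = g % 2 ∧ g % 2 = b % 2) := by
  rcases Nat.mod_two_eq_zero_or_one c with h | h <;>
    rcases Nat.mod_two_eq_zero_or_one g with hg | hg <;>
      rcases Nat.mod_two_eq_zero_or_one b with hb | hb <;>
        simp [h, hg, hb, encXor]

-- the XOR loop of A, characterised by the three counts
lemma xor_fold (l : List String) (hl : ∀ q ∈ l, q = "R" ∨ q = "G" ∨ q = "B") :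
    ∀ a : Nat,
      l.foldl (fun acc qux =>
        match acc, PySem.Dict.get? (PySem.Dict.ofList [("R", (1:Nat)), ("G", 2), ("B", 3)]) qux with
        | some x, some v => some (x ^^^ v)
        | _, _ => none) (some a)
      = some (a ^^^ encXor (l.count "R" % 2) (l.count "G" % 2) (l.count "B" % 2)) := by
  induction l with
  | nil => intro a; simp [encXor]
  | cons q t ih =>
    intro a
    have ht : ∀ q ∈ t, q = "R" ∨ q = "G" ∨ q = "B" := fun x hx => hl x (List.mem_cons_of_mem _ hx)
    rcases hl q (List.mem_cons_self) with h | h | h <;> subst h <;>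
      simp only [List.foldl_cons, List.count_cons] <;>
      rw [show (PySem.Dict.get? (PySem.Dict.ofList [("R", (1:Nat)), ("G", 2), ("B", 3)]) _) = some _ from rfl]
    · rw [ih ht (a ^^^ 1), Nat.xor_assoc, encXor_R]
      simp
    · rw [ih ht (a ^^^ 2), Nat.xor_assoc, encXor_G]
      simp
    · rw [ih ht (a ^^^ 3), Nat.xor_assoc, encXor_B]
      simp

-- all-same non-empty lists have a one-element set
lemma ofList_all_same (q : String) (t : List String) (h : ∀ x ∈ t, x = q) :
    PySem.Set.ofList (q :: t) = [q] := by
  have step : ∀ (t' : List String), (∀ x ∈ t', x = q) → t'.foldl PySem.Set.add [q] = [q] := by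
    intro t'
    induction t' with
    | nil => intro _; rfl
    | cons x s ih =>
      intro hx
      have hxq : x = q := hx x (List.mem_cons_self)
      subst hxq
      have : PySem.Set.add [x] x = [x] := by simp [PySem.Set.add, PySem.Set.contains]
      simpa [this] using ih (fun y hy => hx y (List.mem_cons_of_mem _ hy))
  calc PySem.Set.ofList (q :: t) = (q :: t).foldl PySem.Set.add [] := by
        simp [PySem.Set.ofList_eq_foldl]
    _ = t.foldl PySem.Set.add [q] := by simp [PySem.Set.add, PySem.Set.contains]
    _ = [q] := step t h

-- ===== VERDICT (by name: the statement is the Claim_ definition above) =====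
theorem solve_spec : Claim_equal_solve := by
  intro quxes _ hpre
  unfold Spec_solve solve solve_alt
  by_cases h1 : (PySem.Set.ofList quxes).len = 1
  all_goals simp only [PySem.Set.len] at h1
  · simp [h1]
  · by_cases h2 : (quxes.length : Int) ≤ 1
    · simp [h2]
    · simp only [h2, if_false]
      have hrgb : ∀ q ∈ quxes, q = "R" ∨ q = "G" ∨ q = "B" := by
        rcases hpre with hlen | hsame | hrgb
        · exact absurd (by exact_mod_cast hlen) h2
        · -- all elements equal: then the set has one element, contradicting h1
          match quxes, h2 with
          | q :: t, _ =>
            exfalso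
            apply h1
            have : PySem.Set.ofList (q :: t) = [q] :=
              ofList_all_same q t (fun x hx =>
                hsame x (List.mem_cons_of_mem _ hx) q (List.mem_cons_self))
            rw [this]
            rfl
        · exact hrgb
      rw [xor_fold quxes hrgb 0]
      simp only [Nat.zero_xor]
      rw [show PySem.List.count quxes "R" = quxes.count "R" from rfl,
          show PySem.List.count quxes "G" = quxes.count "G" from rfl,
          show PySem.List.count quxes "B" = quxes.count "B" from rfl]
      by_cases hp : quxes.count "R" % 2 = quxes.count "G" % 2 ∧
          quxes.count "G" % 2 = quxes.count "B" % 2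
      · rw [(encXor_eq_zero_iff _ _ _).mpr hp]
        simp [hp]
      · have hz : encXor (quxes.count "R" % 2) (quxes.count "G" % 2) (quxes.count "B" % 2) ≠ 0 :=
          fun h => hp ((encXor_eq_zero_iff _ _ _).mp h)
        rcases Nat.exists_eq_succ_of_ne_zero hz with ⟨k, hk⟩
        rw [hk]
        simp [hp]
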